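-- pv_equiv track=rewrite | github.com/cometadata/funding-metadata-enrichment | evals/benchmark_results/error_analysis.py | greedy_match_ids
-- ===== SOURCE A (Python) =====
-- def normalize_id(s):
--     return s.strip().upper().replace("-", "").replace("/", "").replace(" ", "")
--
-- def greedy_match_ids(gold_ids, pred_ids):
--     g_norm = [normalize_id(x) for x in gold_ids]
--     p_norm = [normalize_id(x) for x in pred_ids]
--
--     used_g, used_p = set(), set()
--     matched = []
--     for gi, gn in enumerate(g_norm):
--         for pi, pn in enumerate(p_norm):
--             if gi not in used_g and pi not in used_p and gn == pn:
--                 matched.append((gi, pi))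
--                 used_g.add(gi)
--                 used_p.add(pi)
--
--     unmatched_g = [i for i in range(len(gold_ids)) if i not in used_g]
--     unmatched_p = [i for i in range(len(pred_ids)) if i not in used_p]
--     return matched, unmatched_g, unmatched_p
-- ===== SOURCE B (Python) =====
-- def normalize_id(s):
--     return s.strip().upper().replace("-", "").replace("/", "").replace(" ", "")
--
-- def greedy_match_ids(gold_ids, pred_ids):
--     # Bucket pred indices by normalized value once, then pop the earliest
--     # remaining index per gold: one pass over preds + one pass over golds.
--     queues = {}
--     for pi, p in enumerate(pred_ids):
--         pn = normalize_id(p)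
--         queues[pn] = queues.get(pn, []) + [pi]
--     matched, unmatched_g = [], []
--     used_p = set()
--     for gi, g in enumerate(gold_ids):
--         gn = normalize_id(g)
--         q = queues.get(gn, [])
--         if q:
--             pi = q[0]
--             queues[gn] = q[1:]
--             matched.append((gi, pi))
--             used_p.add(pi)
--         else:
--             unmatched_g.append(gi)
--     unmatched_p = [i for i in range(len(pred_ids)) if i not in used_p]
--     return matched, unmatched_g, unmatched_p
-- ===== Notes on version B (the rewrite author's own statement) =====
-- stated objective: faster
-- what changed: Replaces the nested gold-by-pred quadratic scan by a hash of normalized pred values to ordered queues of indices, popping the earliest remaining index per gold in a single pass.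
import Mathlib
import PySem

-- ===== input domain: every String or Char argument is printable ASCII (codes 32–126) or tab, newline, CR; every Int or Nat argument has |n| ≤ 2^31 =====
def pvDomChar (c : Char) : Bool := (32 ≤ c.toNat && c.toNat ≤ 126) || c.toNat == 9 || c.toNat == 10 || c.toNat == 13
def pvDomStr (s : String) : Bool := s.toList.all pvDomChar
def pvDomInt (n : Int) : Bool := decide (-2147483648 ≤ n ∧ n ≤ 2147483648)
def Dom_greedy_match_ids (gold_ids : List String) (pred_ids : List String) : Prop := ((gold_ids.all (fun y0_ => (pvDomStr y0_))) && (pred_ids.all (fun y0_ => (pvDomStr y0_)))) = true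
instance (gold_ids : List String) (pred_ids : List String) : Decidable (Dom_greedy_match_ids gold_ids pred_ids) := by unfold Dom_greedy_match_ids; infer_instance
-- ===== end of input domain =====

-- B buckets pred indices by normalized value in one pass and pops the earliest remaining
-- index per gold, instead of A's nested scan of all preds for every gold (objective: faster).

-- ===== PORT A =====
def normalize_id (s : String) : String :=
  PySem.Str.replace (PySem.Str.replace (PySem.Str.replace
    (PySem.Str.upper (PySem.Str.strip s)) "-" "") "/" "") " " ""

-- inner 'for pi, pn in enumerate(p_norm)' loop body of A
def pvInnerStep (g : Int × String) (st : PySem.Set Int × PySem.Set Int × List (Int × Int))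
    (p : Int × String) : PySem.Set Int × PySem.Set Int × List (Int × Int) :=
  if ¬ (PySem.Set.contains st.1 g.1) ∧ ¬ (PySem.Set.contains st.2.1 p.1) ∧ g.2 = p.2 then
    (PySem.Set.add st.1 g.1, PySem.Set.add st.2.1 p.1, st.2.2 ++ [(g.1, p.1)])
  else st

def greedy_match_ids (gold_ids : List String) (pred_ids : List String) :
    (List (Int × Int)) × List Int × List Int :=
  let g_norm := gold_ids.map normalize_id
  let p_norm := pred_ids.map normalize_id
  let st := (PySem.List.enumerate g_norm).foldl
    (fun st g => (PySem.List.enumerate p_norm).foldl (pvInnerStep g) st)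
    (PySem.Set.empty, PySem.Set.empty, [])
  (st.2.2,
   (PySem.List.pyRange 0 gold_ids.length 1).filter (fun i => !(PySem.Set.contains st.1 i)),
   (PySem.List.pyRange 0 pred_ids.length 1).filter (fun i => !(PySem.Set.contains st.2.1 i)))

-- ===== PORT B =====
-- 'for gi, g in enumerate(gold_ids)' loop body of B; 'if q:' with q[0]/q[1:] is the cons match
def pvAltStep (st : PySem.Dict String (List Int) × List (Int × Int) × List Int × PySem.Set Int)
    (g : Int × String) :
    PySem.Dict String (List Int) × List (Int × Int) × List Int × PySem.Set Int :=
  let gn := normalize_id g.2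
  match st.1.getD gn [] with
  | [] => (st.1, st.2.1, st.2.2.1 ++ [g.1], st.2.2.2)
  | pi :: rest =>
    (st.1.insert gn rest, st.2.1 ++ [(g.1, pi)], st.2.2.1, PySem.Set.add st.2.2.2 pi)

def greedy_match_ids_alt (gold_ids : List String) (pred_ids : List String) :
    (List (Int × Int)) × List Int × List Int :=
  let queues := (PySem.List.enumerate pred_ids).foldl
    (fun d p => d.insert (normalize_id p.2) (d.getD (normalize_id p.2) [] ++ [p.1]))
    PySem.Dict.empty
  let st := (PySem.List.enumerate gold_ids).foldl pvAltStep
    (queues, [], [], PySem.Set.empty)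
  (st.2.1, st.2.2.1,
   (PySem.List.pyRange 0 pred_ids.length 1).filter (fun i => !(PySem.Set.contains st.2.2.2 i)))

-- ===== PRECONDITION & SPEC =====
def Spec_greedy_match_ids (gold_ids : List String) (pred_ids : List String) (out : (List (Int × Int)) × List Int × List Int) : Prop := out = greedy_match_ids_alt gold_ids pred_ids
instance (gold_ids : List String) (pred_ids : List String) (out : (List (Int × Int)) × List Int × List Int) : Decidable (Spec_greedy_match_ids gold_ids pred_ids out) := by unfold Spec_greedy_match_ids; infer_instance

-- ===== CLAIM (what is proved, stated in full; the proofs are below) =====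
def Claim_equal_greedy_match_ids : Prop := ∀ (gold_ids : List String) (pred_ids : List String), Dom_greedy_match_ids gold_ids pred_ids → Spec_greedy_match_ids gold_ids pred_ids (greedy_match_ids gold_ids pred_ids)

-- ===== LEMMAS AND PROOFS =====

-- Set helpers
theorem pvMem_add (s : PySem.Set Int) (x y : Int) :
    y ∈ PySem.Set.add s x ↔ y = x ∨ y ∈ s := by
  rw [PySem.Set.mem_add]; tauto

-- the list of still-free pred indices whose normalized value is s, in order
def pvQF (up : PySem.Set Int) (s : String) (l : List (Int × String)) : List Int :=
  (l.filter (fun p => !(decide (p.1 ∈ up)) && (p.2 == s))).map (fun p => p.1)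

theorem pvQF_add (up : PySem.Set Int) (x : Int) (s : String) (l : List (Int × String)) :
    pvQF (PySem.Set.add up x) s l = (pvQF up s l).filter (fun i => !(i == x)) := by
  unfold pvQF
  rw [List.filter_map, List.filter_filter]
  apply congrArg
  apply List.filter_congr
  intro p hp
  by_cases h1 : p.1 = x <;> by_cases h2 : p.1 ∈ up <;>
    simp [h1, h2, Function.comp]

theorem pvQF_sorted (up : PySem.Set Int) (s : String) (l : List (Int × String))
    (h : l.Pairwise (fun p q => p.1 < q.1)) : (pvQF up s l).Pairwise (· < ·) := by
  unfold pvQF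
  rw [List.pairwise_map]
  exact h.filter _

theorem pv_mem_QF (up : PySem.Set Int) (s : String) (l : List (Int × String)) (i : Int)
    (h : i ∈ pvQF up s l) : ∃ p ∈ l, p.1 = i ∧ p.2 = s := by
  unfold pvQF at h
  rcases List.mem_map.1 h with ⟨p, hp, rfl⟩
  rcases List.mem_filter.1 hp with ⟨hmem, hcond⟩
  simp at hcond
  exact ⟨p, hmem, rfl, hcond.2⟩

-- A's inner loop is stuck once the current gold index is used
theorem pvInner_stuck (l : List (Int × String)) (g : Int × String)
    (st : PySem.Set Int × PySem.Set Int × List (Int × Int))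
    (h : g.1 ∈ st.1) :
    l.foldl (pvInnerStep g) st = st := by
  induction l generalizing st with
  | nil => rfl
  | cons p t ih =>
    simp only [List.foldl_cons]
    rw [show pvInnerStep g st p = st by simp [pvInnerStep, PySem.Set.contains, h]]
    exact ih st h

-- A's inner loop = take the first free pred index with the right normalized value
theorem pvInner_eq (l : List (Int × String)) (g : Int × String)
    (ug up : PySem.Set Int) (m : List (Int × Int))
    (h : g.1 ∉ ug) :
    l.foldl (pvInnerStep g) (ug, up, m) =
      match (pvQF up g.2 l).head? with
      | none => (ug, up, m)
      | some pi => (PySem.Set.add ug g.1, PySem.Set.add up pi, m ++ [(g.1, pi)]) := by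
  induction l with
  | nil => rfl
  | cons p t ih =>
    simp only [List.foldl_cons]
    by_cases hu : p.1 ∈ up
    · rw [show pvInnerStep g (ug, up, m) p = (ug, up, m) by
        simp [pvInnerStep, PySem.Set.contains, hu]]
      rw [ih, show pvQF up g.2 (p :: t) = pvQF up g.2 t by
        simp [pvQF, hu]]
    · by_cases hs : p.2 = g.2
      · rw [show pvInnerStep g (ug, up, m) p =
            (PySem.Set.add ug g.1, PySem.Set.add up p.1, m ++ [(g.1, p.1)]) by
          simp [pvInnerStep, PySem.Set.contains, hu, h, hs.symm]]
        rw [pvInner_stuck t g _ (by simp)]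
        rw [show pvQF up g.2 (p :: t) = p.1 :: pvQF up g.2 t by
          simp [pvQF, hu, hs]]
        rfl
      · rw [show pvInnerStep g (ug, up, m) p = (ug, up, m) by
          simp [pvInnerStep, PySem.Set.contains]
          intro _ _ h2
          exact absurd h2.symm hs]
        rw [ih, show pvQF up g.2 (p :: t) = pvQF up g.2 t by
          simp [pvQF, hs]]

-- enumerate of a mapped list
theorem pvEnumerate_map (f : String → String) (xs : List String) (k : Int) :
    PySem.List.enumerate (xs.map f) k =
      (PySem.List.enumerate xs k).map (fun p => (p.1, f p.2)) := by
  induction xs generalizing k with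
  | nil => simp [PySem.List.enumerate_nil]
  | cons x t ih => simp [PySem.List.enumerate_cons, ih]

-- the queue-building loop of B
theorem pvBuild_getD (l : List (Int × String)) (d : PySem.Dict String (List Int)) (s : String) :
    (l.foldl (fun d p => d.insert (normalize_id p.2) (d.getD (normalize_id p.2) [] ++ [p.1])) d).getD s []
      = d.getD s [] ++ ((l.filter (fun p => normalize_id p.2 == s)).map (fun p => p.1)) := by
  induction l generalizing d with
  | nil => simp
  | cons p t ih =>
    simp only [List.foldl_cons, List.filter_cons]
    rw [ih]
    by_cases hs : s = normalize_id p.2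
    · rw [PySem.Dict.getD_insert]
      simp [hs]
    · rw [PySem.Dict.getD_insert]
      simp [hs, Ne.symm hs]

theorem pvBuild_inv (pred_ids : List String) (s : String) :
    ((PySem.List.enumerate pred_ids).foldl
        (fun d p => d.insert (normalize_id p.2) (d.getD (normalize_id p.2) [] ++ [p.1]))
        PySem.Dict.empty).getD s []
      = pvQF PySem.Set.empty s (PySem.List.enumerate (pred_ids.map normalize_id)) := by
  rw [pvBuild_getD, pvEnumerate_map]
  simp [pvQF, List.filter_map, PySem.Set.empty]
  simp [Function.comp_def]

-- first components of an enumeration are distinct, so an equal index pins the pair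
theorem pvEnum_fst_inj (xs : List String) :
    ∀ p ∈ PySem.List.enumerate xs 0, ∀ q ∈ PySem.List.enumerate xs 0,
      p.1 = q.1 → p = q := by
  intro p hp q hq h
  have hpair : (PySem.List.enumerate xs 0).Pairwise (fun p q : Int × String => p.1 ≠ q.1) :=
    (PySem.List.pairwise_lt_enumerate xs 0).imp (by intro a b hab; omega)
  by_cases hpq : p = q
  · exact hpq
  · exact absurd h (hpair.forall (by intro a b hab; exact hab.symm) hp hq hpq)

-- Main simulation invariant between A's outer loop and B's loop
theorem pvMain (pe : List (Int × String))
    (hpe : pe.Pairwise (fun p q => p.1 < q.1))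
    (hinj : ∀ p ∈ pe, ∀ q ∈ pe, p.1 = q.1 → p = q)
    (gs : List String) (k : Nat) (ug up : PySem.Set Int) (m : List (Int × Int))
    (queues : PySem.Dict String (List Int)) (unmg : List Int)
    (hug : ∀ i ∈ ug, i < (k : Int))
    (hunmg : unmg = (PySem.List.pyRange 0 (k : Int) 1).filter
        (fun i => !(PySem.Set.contains ug i)))
    (hq : ∀ s, queues.getD s [] = pvQF up s pe) :
    (let stA := (PySem.List.enumerate (gs.map normalize_id) k).foldl
        (fun st g => pe.foldl (pvInnerStep g) st) (ug, up, m);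
     let stB := (PySem.List.enumerate gs k).foldl pvAltStep (queues, m, unmg, up);
     stA.2.2 = stB.2.1 ∧
     stB.2.2.1 = (PySem.List.pyRange 0 ((k : Int) + gs.length) 1).filter
        (fun i => !(PySem.Set.contains stA.1 i)) ∧
     stA.2.1 = stB.2.2.2) := by
  induction gs generalizing k ug up m queues unmg with
  | nil =>
    simp only [List.map_nil, PySem.List.enumerate_nil, List.foldl_nil]
    exact ⟨trivial, by simpa using hunmg, trivial⟩
  | cons g gs ih =>
    simp only [List.map_cons, PySem.List.enumerate_cons, List.foldl_cons]
    have hkg : ((k : Int), g).1 ∉ ug := fun hmem => absurd (hug _ hmem) (by omega)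
    rw [pvInner_eq pe ((k : Int), normalize_id g) ug up m hkg]
    have hBstep : pvAltStep (queues, m, unmg, up) ((k : Int), g) =
        match queues.getD (normalize_id g) [] with
        | [] => (queues, m, unmg ++ [(k : Int)], up)
        | pi :: rest => (queues.insert (normalize_id g) rest, m ++ [((k : Int), pi)],
            unmg, PySem.Set.add up pi) := by
      simp only [pvAltStep]
    rw [hBstep, hq]
    cases hE : pvQF up (normalize_id g) pe with
    | nil =>
      simp only [List.head?_nil]
      have hcast : ((k : Int) + 1) = (((k + 1 : Nat)) : Int) := by push_cast; ring
      rw [hcast]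
      have := ih (k + 1) ug up m queues (unmg ++ [(k : Int)])
        (fun i hi => by have := hug i hi; push_cast; omega)
        (by
          rw [hunmg]
          push_cast
          rw [PySem.List.pyRange_one_succ_right (by positivity)]
          rw [List.filter_append]
          simp [PySem.Set.contains, hkg])
        hq
      refine ⟨this.1, ?_, this.2.2⟩
      have hlen : (k : Int) + ((g :: gs).length : Int) = (((k + 1 : Nat)) : Int) + (gs.length : Int) := by
        simp only [List.length_cons]
        push_cast
        ring
      rw [hlen]
      exact this.2.1
    | cons pi rest =>
      simp only [List.head?_cons]
      have hcast : ((k : Int) + 1) = (((k + 1 : Nat)) : Int) := by push_cast; ring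
      rw [hcast]
      -- facts about pi and rest
      have hsort := pvQF_sorted up (normalize_id g) pe hpe
      rw [hE] at hsort
      have hrest : ∀ x ∈ rest, pi < x := by
        intro x hx
        exact (List.pairwise_cons.1 hsort).1 x hx
      have hpi_mem : pi ∈ pvQF up (normalize_id g) pe := by rw [hE]; exact List.mem_cons_self
      obtain ⟨pq, hpq_mem, hpq1, hpq2⟩ := pv_mem_QF up (normalize_id g) pe pi hpi_mem
      have hq' : ∀ s, (queues.insert (normalize_id g) rest).getD s [] =
          pvQF (PySem.Set.add up pi) s pe := by
        intro s
        rw [pvQF_add, PySem.Dict.getD_insert]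
        by_cases hs : s = normalize_id g
        · rw [if_pos hs, hs, hE, List.filter_cons]
          rw [if_neg (by simp)]
          rw [List.filter_eq_self.2 (fun x hx => by
            have := hrest x hx
            have hne : x ≠ pi := by omega
            simp [hne])]
        · rw [if_neg hs, hq s]
          rw [List.filter_eq_self.2 (fun x hx => by
            have hne : x ≠ pi := by
              intro hxpi
              subst hxpi
              obtain ⟨pq', hpq'_mem, hpq'1, hpq'2⟩ := pv_mem_QF up s pe x hx
              have := hinj pq hpq_mem pq' hpq'_mem (by rw [hpq1, hpq'1])
              apply hs
              rw [← hpq'2, ← this, hpq2]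
            simp [hne])]
      have := ih (k + 1) (PySem.Set.add ug (k : Int)) (PySem.Set.add up pi)
        (m ++ [((k : Int), pi)]) (queues.insert (normalize_id g) rest) unmg
        (fun i hi => by
          rcases (pvMem_add ug (k : Int) i).1 hi with h1 | h1
          · push_cast; omega
          · have := hug i h1; push_cast; omega)
        (by
          rw [hunmg]
          push_cast
          rw [PySem.List.pyRange_one_succ_right (by positivity)]
          rw [List.filter_append]
          have hk_in : (k : Int) ∈ PySem.Set.add ug (k : Int) := (pvMem_add _ _ _).2 (Or.inl rfl)
          have htail : List.filter (fun i => !(PySem.Set.contains (PySem.Set.add ug (k : Int)) i)) [(k : Int)] = [] := by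
            simp [PySem.Set.contains]
          rw [htail, List.append_nil]
          apply List.filter_congr
          intro x hx
          rw [PySem.List.mem_pyRange_one] at hx
          have hxk : x ≠ (k : Int) := by omega
          simp [PySem.Set.contains, hxk])
        hq'
      refine ⟨this.1, ?_, this.2.2⟩
      have hlen : (k : Int) + ((g :: gs).length : Int) = (((k + 1 : Nat)) : Int) + (gs.length : Int) := by
        simp only [List.length_cons]
        push_cast
        ring
      rw [hlen]
      exact this.2.1

-- ===== VERDICT (by name: the statement is the Claim_ definition above) =====
theorem greedy_match_ids_spec : Claim_equal_greedy_match_ids := by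
  intro gold_ids pred_ids _
  unfold Spec_greedy_match_ids
  have hA : greedy_match_ids gold_ids pred_ids =
      (let stA := (PySem.List.enumerate (gold_ids.map normalize_id) 0).foldl
        (fun st g => (PySem.List.enumerate (pred_ids.map normalize_id) 0).foldl (pvInnerStep g) st)
        (PySem.Set.empty, PySem.Set.empty, []);
      (stA.2.2,
       (PySem.List.pyRange 0 gold_ids.length 1).filter (fun i => !(PySem.Set.contains stA.1 i)),
       (PySem.List.pyRange 0 pred_ids.length 1).filter (fun i => !(PySem.Set.contains stA.2.1 i)))) := rfl
  have hB : greedy_match_ids_alt gold_ids pred_ids =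
      (let queues := (PySem.List.enumerate pred_ids 0).foldl
        (fun d p => d.insert (normalize_id p.2) (d.getD (normalize_id p.2) [] ++ [p.1]))
        PySem.Dict.empty;
      let stB := (PySem.List.enumerate gold_ids 0).foldl pvAltStep (queues, [], [], PySem.Set.empty);
      (stB.2.1, stB.2.2.1,
       (PySem.List.pyRange 0 pred_ids.length 1).filter (fun i => !(PySem.Set.contains stB.2.2.2 i)))) := rfl
  rw [hA, hB]
  have hmain := pvMain (PySem.List.enumerate (pred_ids.map normalize_id))
    (PySem.List.pairwise_lt_enumerate _ _)
    (pvEnum_fst_inj (pred_ids.map normalize_id))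
    gold_ids 0 PySem.Set.empty PySem.Set.empty [] _ []
    (by intro i hi; exact absurd hi (List.not_mem_nil))
    (by simp)
    (fun s => pvBuild_inv pred_ids s)
  obtain ⟨h1, h2, h3⟩ := hmain
  simp only [Nat.cast_zero, zero_add] at h1 h2 h3
  simp only []
  rw [h1, h2, h3]
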